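-- pv_equiv track=rewrite | github.com/DaviddAriza/CSClasses | CS 313E/test_2/SpellingTest.py | spelling_test_helper
-- ===== SOURCE A (Python) =====
-- def spelling_test_helper(s, l):
--     if s.strip() == '':
--         return True
--
--     if len(l) == 0:
--         return False
--
--     if l[0] in s:
--         s = s.replace(l[0], ' ')
--
--     return spelling_test_helper(s, l[1:])
-- ===== SOURCE B (Python) =====
-- def spelling_test_helper(s, l):
--     # Apply every replacement once, then test emptiness a single time:
--     # an all-whitespace string stays all-whitespace under replace(w, ' '),
--     # so A's per-step early exits never change the result.
--     for w in l:
--         s = s.replace(w, ' ')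
--     return s.strip() == ''
-- ===== Notes on version B (the rewrite author's own statement) =====
-- stated objective: simpler
-- what changed: Replaced the recursion over l with its interleaved per-step strip early-exit checks by a single fold applying all replacements followed by ONE final strip-emptiness test, justified by the invariant that an all-whitespace string stays all-whitespace under replace(w, ' ').
import Mathlib
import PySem

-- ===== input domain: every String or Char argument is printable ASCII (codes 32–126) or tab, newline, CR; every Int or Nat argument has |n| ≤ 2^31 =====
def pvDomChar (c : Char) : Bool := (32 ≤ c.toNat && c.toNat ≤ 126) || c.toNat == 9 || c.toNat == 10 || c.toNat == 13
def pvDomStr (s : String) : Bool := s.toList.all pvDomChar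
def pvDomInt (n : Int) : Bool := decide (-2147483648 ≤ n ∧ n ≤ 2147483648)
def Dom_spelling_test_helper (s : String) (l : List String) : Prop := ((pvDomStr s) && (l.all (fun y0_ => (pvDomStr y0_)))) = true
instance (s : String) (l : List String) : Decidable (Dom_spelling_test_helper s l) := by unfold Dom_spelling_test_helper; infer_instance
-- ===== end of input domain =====

-- B replaces A's recursion over l (with an early-exit strip check before each step)
-- by one fold applying every replacement, then a single final strip-emptiness test;
-- proved equal because an all-whitespace string stays all-whitespace under replace(w, ' ').

-- ===== PORT A =====
def spelling_test_helper (s : String) (l : List String) : Bool :=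
  if PySem.Str.strip s == "" then true
  else
    match l with
    | [] => false
    | w :: t =>
      spelling_test_helper (if PySem.Str.isIn w s then PySem.Str.replace s w " " else s) t

-- ===== PORT B =====
def spelling_test_helper_alt (s : String) (l : List String) : Bool :=
  PySem.Str.strip (l.foldl (fun acc w => PySem.Str.replace acc w " ") s) == ""

-- ===== PRECONDITION & SPEC =====
def Spec_spelling_test_helper (s : String) (l : List String) (out : Bool) : Prop := out = spelling_test_helper_alt s l
instance (s : String) (l : List String) (out : Bool) : Decidable (Spec_spelling_test_helper s l out) := by unfold Spec_spelling_test_helper; infer_instance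

-- ===== CLAIM (what is proved, stated in full; the proofs are below) =====
def Claim_equal_spelling_test_helper : Prop := ∀ (s : String) (l : List String), Dom_spelling_test_helper s l → Spec_spelling_test_helper s l (spelling_test_helper s l)

-- ===== LEMMAS AND PROOFS =====

-- strip s = [] iff every char of s is whitespace
theorem strip_eq_nil_iff (cs : List Char) :
    PySem.Chars.strip cs = [] ↔ ∀ c ∈ cs, PySem.Chars.isspace c = true := by
  unfold PySem.Chars.strip PySem.Chars.rstrip PySem.Chars.lstrip
  constructor
  · intro h c hc
    have h1 : List.dropWhile PySem.Chars.isspace (List.dropWhile PySem.Chars.isspace cs).reverse = [] := by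
      simpa using congrArg List.reverse h
    rw [List.dropWhile_eq_nil_iff] at h1
    have hcs : List.takeWhile PySem.Chars.isspace cs ++ List.dropWhile PySem.Chars.isspace cs = cs :=
      List.takeWhile_append_dropWhile
    rw [← hcs] at hc
    rcases List.mem_append.mp hc with h2 | h2
    · exact List.mem_takeWhile_imp h2
    · exact h1 c (List.mem_reverse.mpr h2)
  · intro h
    have : List.dropWhile PySem.Chars.isspace cs = [] :=
      List.dropWhile_eq_nil_iff.mpr (by intro x hx; exact h x hx)
    simp [this]

-- replace.go preserves all-whitespace when new is whitespace
theorem replace_go_ws (old new : List Char) (hnew : ∀ c ∈ new, PySem.Chars.isspace c = true)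
    (fuel : Nat) :
    ∀ (l acc : List Char), (∀ c ∈ l, PySem.Chars.isspace c = true) →
      (∀ c ∈ acc, PySem.Chars.isspace c = true) →
      ∀ c ∈ PySem.Chars.replace.go old new fuel l acc, PySem.Chars.isspace c = true := by
  induction fuel with
  | zero =>
    intro l acc hl hacc c hc
    simp only [PySem.Chars.replace.go] at hc
    rcases List.mem_append.mp hc with h | h
    · exact hacc c (List.mem_reverse.mp h)
    · exact hl c h
  | succ fuel ih =>
    intro l acc hl hacc c hc
    cases l with
    | nil =>
      simp only [PySem.Chars.replace.go] at hc
      exact hacc c (List.mem_reverse.mp hc)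
    | cons x t =>
      simp only [PySem.Chars.replace.go] at hc
      split at hc
      · refine ih _ _ ?_ ?_ c hc
        · intro d hd; exact hl d (List.mem_of_mem_drop hd)
        · intro d hd
          rcases List.mem_append.mp hd with h | h
          · exact hnew d (List.mem_reverse.mp h)
          · exact hacc d h
      · refine ih _ _ ?_ ?_ c hc
        · intro d hd; exact hl d (List.mem_cons_of_mem _ hd)
        · intro d hd
          rcases List.mem_cons.mp hd with h | h
          · exact hl d (h ▸ List.mem_cons_self ..)
          · exact hacc d h

-- replace with a whitespace replacement preserves all-whitespace
theorem replace_ws (s old : List Char) (h : ∀ c ∈ s, PySem.Chars.isspace c = true) :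
    ∀ c ∈ PySem.Chars.replace s old [' '], PySem.Chars.isspace c = true := by
  intro c hc
  unfold PySem.Chars.replace at hc
  split at hc
  · rcases List.mem_append.mp hc with h1 | h1
    · simp at h1; simp [h1]; decide
    · rcases List.mem_flatMap.mp h1 with ⟨d, hd, hcd⟩
      rcases List.mem_cons.mp hcd with h2 | h2
      · rw [h2]; exact h d hd
      · simp at h2; simp [h2]; decide
  · exact replace_go_ws old [' '] (by intro d hd; simp at hd; simp [hd]; decide) _ s [] h (by simp) c hc

-- replace with nonempty old not in s is identity
theorem replace_go_not_infix (old new : List Char) (fuel : Nat) :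
    ∀ (l acc : List Char), ¬ (old <:+: l) →
      PySem.Chars.replace.go old new fuel l acc = acc.reverse ++ l := by
  induction fuel with
  | zero => intro l acc _; simp [PySem.Chars.replace.go]
  | succ fuel ih =>
    intro l acc hinf
    cases l with
    | nil => simp [PySem.Chars.replace.go]
    | cons x t =>
      simp only [PySem.Chars.replace.go]
      have hpre : old.isPrefixOf (x :: t) = false := by
        by_contra h
        exact hinf (List.IsPrefix.isInfix (List.isPrefixOf_iff_prefix.mp (by simpa using h)))
      rw [if_neg (by simp [hpre])]
      rw [ih t (x :: acc) (fun h => hinf (List.infix_cons h))]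
      simp

theorem replace_not_in (s old new : List Char) (h : PySem.Chars.isIn old s = false) :
    PySem.Chars.replace s old new = s := by
  have hold : old ≠ [] := by
    intro he; rw [he] at h; rw [PySem.Chars.isIn_nil] at h; exact Bool.false_ne_true h.symm
  unfold PySem.Chars.replace
  rw [if_neg (by simpa using hold)]
  rw [replace_go_not_infix old new s.length s [] ((PySem.Chars.isIn_eq_false_iff _ _).mp h)]
  rfl

-- String-level: strip s == "" as a Chars statement
theorem str_strip_empty_iff (s : String) :
    (PySem.Str.strip s == "") = true ↔ ∀ c ∈ s.toList, PySem.Chars.isspace c = true := by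
  rw [beq_iff_eq]
  constructor
  · intro h
    have := congrArg String.toList h
    rw [PySem.Str.toList_strip] at this
    simpa [strip_eq_nil_iff] using this
  · intro h
    have : PySem.Chars.strip s.toList = [] := (strip_eq_nil_iff _).mpr h
    unfold PySem.Str.strip
    rw [this]

-- the B-side fold preserves all-whitespace
theorem foldl_replace_ws (t : List String) :
    ∀ s : String, (∀ c ∈ s.toList, PySem.Chars.isspace c = true) →
      ∀ c ∈ (t.foldl (fun acc w => PySem.Str.replace acc w " ") s).toList,
        PySem.Chars.isspace c = true := by
  induction t with
  | nil => intro s h; simpa using h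
  | cons w t ih =>
    intro s h
    simp only [List.foldl_cons]
    refine ih _ ?_
    intro c hc
    rw [PySem.Str.toList_replace] at hc
    exact replace_ws s.toList w.toList h c hc

theorem main_equiv (l : List String) : ∀ s : String,
    spelling_test_helper s l = spelling_test_helper_alt s l := by
  induction l with
  | nil =>
    intro s
    unfold spelling_test_helper spelling_test_helper_alt
    by_cases h : (PySem.Str.strip s == "") = true
    · simp [h]
    · simp only [List.foldl_nil]
      rw [if_neg h]
      exact (Bool.not_eq_true _ ▸ (by simpa using h) : (PySem.Str.strip s == "") = false).symm
  | cons w t ih =>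
    intro s
    unfold spelling_test_helper
    by_cases h : (PySem.Str.strip s == "") = true
    · rw [if_pos h]
      unfold spelling_test_helper_alt
      symm
      rw [str_strip_empty_iff]
      exact foldl_replace_ws (w :: t) s ((str_strip_empty_iff s).mp h)
    · rw [if_neg h]
      show spelling_test_helper (if PySem.Str.isIn w s = true then PySem.Str.replace s w " " else s) t
            = spelling_test_helper_alt s (w :: t)
      by_cases hin : PySem.Str.isIn w s = true
      · rw [if_pos hin, ih]
        unfold spelling_test_helper_alt
        rw [List.foldl_cons]
      · rw [if_neg hin, ih]
        unfold spelling_test_helper_alt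
        rw [List.foldl_cons]
        have hrep : PySem.Str.replace s w " " = s := by
          have hfalse : PySem.Chars.isIn w.toList s.toList = false := by
            have : PySem.Str.isIn w s = false := Bool.not_eq_true _ ▸ (by simpa using hin)
            simpa [PySem.Str.isIn] using this
          unfold PySem.Str.replace
          rw [replace_not_in s.toList w.toList _ hfalse]
          exact String.ofList_toList
        rw [hrep]

-- ===== VERDICT (by name: the statement is the Claim_ definition above) =====
theorem spelling_test_helper_spec : Claim_equal_spelling_test_helper := by
  intro s l _
  unfold Spec_spelling_test_helper
  exact main_equiv l s
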